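-- pv_equiv track=rewrite | github.com/pypi-data/pypi-code-84 | seanalgorithms3/seanalgorithms3-0.4.tar.gz/seanalgorithms3/greedy/maximize_sum_array.py | maximize_sum_array
-- ===== SOURCE A (Python) =====
-- def maximize_sum_array(A, K):
--     A.sort()
--
--     i = 0
--     while i < len(A):
--         if K == 0 or A[i] > 0: break
--         if A[i] < 0:
--             A[i] = -A[i]
--             K -= 1
--         i += 1
--
--     if K % 2:
--         index = A.index(min(A))
--         A[index] = -A[index]
--
--     return sum(A)
-- ===== SOURCE B (Python) =====
-- def maximize_sum_array(A, K):
--     negs = [x for x in A if x < 0]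
--     m = len(negs)
--     if 0 <= K < m:
--         negs.sort()
--         return sum(A) - 2 * sum(negs[:K])
--     r = sum(A) - 2 * sum(negs)
--     if (K - m) % 2:
--         r -= 2 * min(abs(x) for x in A)
--     return r
-- ===== Notes on version B (the rewrite author's own statement) =====
-- stated objective: faster
-- what changed: A simulates the greedy flipping with an in-place Python-level while loop over the fully sorted array followed by an index/min mutation; B computes the result in closed form (sum - 2*(sum of flipped negatives) - a parity adjustment by the minimal absolute value), sorting only the list of negatives and only in the one branch (0 <= K < #negatives) where their order matters.
-- outside the precondition, e.g. on maximize_sum_array([], 1): A raises ValueError, B raises ValueError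
import Mathlib
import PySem

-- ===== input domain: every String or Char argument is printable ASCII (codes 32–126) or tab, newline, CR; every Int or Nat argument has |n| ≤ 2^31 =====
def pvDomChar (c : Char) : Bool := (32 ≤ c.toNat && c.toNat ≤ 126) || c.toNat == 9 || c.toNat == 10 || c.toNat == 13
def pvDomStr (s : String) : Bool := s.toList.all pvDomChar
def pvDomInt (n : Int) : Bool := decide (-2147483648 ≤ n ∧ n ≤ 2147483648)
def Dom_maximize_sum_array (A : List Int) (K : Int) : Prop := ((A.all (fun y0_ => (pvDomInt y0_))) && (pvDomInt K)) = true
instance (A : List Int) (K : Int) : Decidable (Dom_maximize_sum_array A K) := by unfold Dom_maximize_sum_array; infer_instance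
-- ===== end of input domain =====

-- B replaces A's in-place flipping loop over the sorted array by a closed-form computation
-- (sum − 2·(sum of flipped negatives) − a parity adjustment by the minimal absolute value),
-- sorting only the negatives and only when 0 ≤ K < #negatives. A sorts and mutates its
-- argument in place; B does not — the equivalence proved here is about the RETURN value only.

-- ===== PORT A =====
-- the while loop of A: state (A, K), index i; reads/writes at i are in range (i < len A)
def pvALoop (A : List Int) (K : Int) (i : Nat) : List Int × Int :=
  if _h : i < A.length then
    if K = 0 ∨ 0 < A.getD i 0 then (A, K)
    else if A.getD i 0 < 0 then
      pvALoop (A.set i (-(A.getD i 0))) (K - 1) (i + 1)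
    else pvALoop A K (i + 1)
  else (A, K)
termination_by A.length - i
decreasing_by all_goals (try simp [List.length_set]); omega

def maximize_sum_array (A : List Int) (K : Int) : Int :=
  let S := PySem.List.sorted A (fun x => x) false
  let p := pvALoop S K 0
  let A3 :=
    if PySem.Int.mod p.2 2 ≠ 0 then
      match PySem.List.min? p.1 (fun x => x) with
      | some m =>
        match PySem.List.index? p.1 m with
        | some idx => p.1.set idx (-m)
        | none => p.1
      | none => p.1
    else p.1
  A3.sum

-- ===== PORT B =====
def maximize_sum_array_alt (A : List Int) (K : Int) : Int :=
  let negs := A.filter (fun x => decide (x < 0))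
  let m : Int := negs.length
  if 0 ≤ K ∧ K < m then
    let negs' := PySem.List.sorted negs (fun x => x) false
    A.sum - 2 * (PySem.List.slice negs' none (some K)).sum
  else
    let r := A.sum - 2 * negs.sum
    if PySem.Int.mod (K - m) 2 ≠ 0 then
      match PySem.List.min? (A.map (fun x => |x|)) (fun x => x) with
      | some mn => r - 2 * mn
      | none => r
    else r

-- ===== PRECONDITION & SPEC =====
-- Pre_ excludes only the inputs where A raises ValueError (min() of an empty list): A = [] with K odd.
def Pre_maximize_sum_array (A : List Int) (K : Int) : Prop := A = [] → PySem.Int.mod K 2 = 0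
instance (A : List Int) (K : Int) : Decidable (Pre_maximize_sum_array A K) := by unfold Pre_maximize_sum_array; infer_instance
def pvWitness_maximize_sum_array : List Int × Int := ([-3, 1, -2, 5], 2)

def Spec_maximize_sum_array (A : List Int) (K : Int) (out : Int) : Prop := out = maximize_sum_array_alt A K
instance (A : List Int) (K : Int) (out : Int) : Decidable (Spec_maximize_sum_array A K out) := by unfold Spec_maximize_sum_array; infer_instance

-- ===== CLAIM (what is proved, stated in full; the proofs are below) =====
def Claim_equal_maximize_sum_array : Prop := ∀ (A : List Int) (K : Int), Dom_maximize_sum_array A K → Pre_maximize_sum_array A K → Spec_maximize_sum_array A K (maximize_sum_array A K)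

-- ===== LEMMAS AND PROOFS =====

-- the pure shape of A's loop on the suffix it still has to scan
def pvGo (l : List Int) (K : Int) : List Int × Int :=
  match l with
  | [] => (l, K)
  | x :: xs =>
    if K = 0 ∨ 0 < x then (x :: xs, K)
    else if x < 0 then
      let p := pvGo xs (K - 1)
      (-x :: p.1, p.2)
    else
      let p := pvGo xs K
      (x :: p.1, p.2)

theorem pvALoop_eq_go (d : Nat) : ∀ (S : List Int) (K : Int) (i : Nat), S.length - i = d →
    pvALoop S K i = ((S.take i ++ (pvGo (S.drop i) K).1, (pvGo (S.drop i) K).2)) := by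
  induction d with
  | zero =>
    intro S K i h
    have hle : S.length ≤ i := by omega
    rw [pvALoop]
    simp [Nat.not_lt.mpr hle, List.drop_eq_nil_of_le hle, List.take_of_length_le hle, pvGo]
  | succ d ih =>
    intro S K i h
    have hi : i < S.length := by omega
    have hdrop : S.drop i = S[i] :: S.drop (i + 1) := List.drop_eq_getElem_cons hi
    have hget : S.getD i 0 = S[i] := List.getD_eq_getElem S 0 hi
    rw [pvALoop]
    rw [dif_pos hi, hget, hdrop]
    by_cases h0 : K = 0 ∨ 0 < S[i]
    · rw [if_pos h0]
      simp [pvGo, if_pos h0, ← hdrop]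
    · rw [if_neg h0]
      by_cases hneg : S[i] < 0
      · rw [if_pos hneg]
        have hlen : (S.set i (-S[i])).length - (i+1) = d := by simp; omega
        rw [ih _ (K-1) (i+1) hlen]
        have hds : (S.set i (-S[i])).drop (i+1) = S.drop (i+1) :=
          List.drop_set_of_lt (by omega)
        have hts : (S.set i (-S[i])).take (i+1) = S.take i ++ [-S[i]] := by
          rw [List.set_eq_take_append_cons_drop, if_pos hi, List.take_append]
          simp [List.length_take, Nat.min_eq_left (Nat.le_of_lt hi), List.take_take]
        rw [hds]
        simp only [pvGo]
        rw [if_neg h0, if_pos hneg]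
        rw [hts, List.append_assoc]
        rfl
      · rw [if_neg hneg]
        rw [ih S K (i+1) (by omega)]
        have hts : S.take (i+1) = S.take i ++ [S[i]] := by
          rw [List.take_add_one]; simp [List.getElem?_eq_getElem hi]
        simp only [pvGo]
        rw [if_neg h0, if_neg hneg]
        rw [hts, List.append_assoc]
        rfl

-- |x| written the way A's loop produces it, and the count of strict negatives
def pvFlip (x : Int) : Int := if x < 0 then -x else x
def pvNegCnt (l : List Int) : Nat := l.countP (fun x => decide (x < 0))

theorem pvNegCnt_zero_of_head_nonneg {x : Int} {xs : List Int}
    (hs : (x :: xs).Pairwise (· ≤ ·)) (hx : 0 ≤ x) : pvNegCnt (x :: xs) = 0 := by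
  unfold pvNegCnt
  rw [List.countP_eq_zero]
  intro a ha
  rcases List.mem_cons.mp ha with rfl | ha
  · simp; omega
  · have := (List.pairwise_cons.mp hs).1 a ha
    simp; omega

-- G1: 0 ≤ K < #negatives — the loop negates the first K elements and stops with K = 0
theorem pvGo_flip_some : ∀ (S : List Int) (K : Int), S.Pairwise (· ≤ ·) →
    0 ≤ K → K < (pvNegCnt S : Int) →
    pvGo S K = ((S.take K.toNat).map (fun x => -x) ++ S.drop K.toNat, 0) := by
  intro S
  induction S with
  | nil => intro K _ _ h2; simp [pvNegCnt] at h2; omega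
  | cons x xs ih =>
    intro K hs h1 h2
    by_cases hK : K = 0
    · subst hK; simp [pvGo]
    · have hxneg : x < 0 := by
        by_contra hge
        push_neg at hge
        rw [pvNegCnt_zero_of_head_nonneg hs hge] at h2
        simp at h2; omega
      have hcnt : pvNegCnt (x :: xs) = pvNegCnt xs + 1 := by
        unfold pvNegCnt; simp [hxneg]
      rw [pvGo]
      rw [if_neg (by push_neg; exact ⟨hK, by omega⟩), if_pos hxneg]
      rw [ih (K - 1) (List.pairwise_cons.mp hs).2 (by omega) (by rw [hcnt] at h2; push_cast at h2 ⊢; omega)]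
      have hKt : K.toNat = (K - 1).toNat + 1 := by omega
      rw [hKt]
      simp

-- G2: K < 0 or K ≥ #negatives — the loop negates every negative and returns K − #negatives
theorem pvGo_flip_all : ∀ (S : List Int) (K : Int), S.Pairwise (· ≤ ·) →
    (K < 0 ∨ (pvNegCnt S : Int) ≤ K) →
    pvGo S K = (S.map pvFlip, K - pvNegCnt S) := by
  intro S
  induction S with
  | nil => intro K _ _; simp [pvGo, pvNegCnt]
  | cons x xs ih =>
    intro K hs hK
    have hxs : xs.Pairwise (· ≤ ·) := (List.pairwise_cons.mp hs).2
    have hnone : pvNegCnt (x :: xs) = 0 → (x :: xs).map pvFlip = x :: xs := by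
      intro h0
      unfold pvNegCnt at h0
      rw [List.countP_eq_zero] at h0
      have : ∀ a ∈ (x :: xs), pvFlip a = a := by
        intro a ha
        have := h0 a ha
        simp at this
        simp [pvFlip]; omega
      rw [List.map_congr_left this]; exact List.map_id' _
    by_cases h0 : K = 0 ∨ 0 < x
    · rw [pvGo, if_pos h0]
      have hz : pvNegCnt (x :: xs) = 0 := by
        rcases h0 with h0 | h0
        · subst h0
          rcases hK with hK | hK
          · omega
          · omega
        · exact pvNegCnt_zero_of_head_nonneg hs (by omega)
      rw [hnone hz, hz]
      simp
    · push_neg at h0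
      rw [pvGo, if_neg (by push_neg; exact h0)]
      by_cases hneg : x < 0
      · rw [if_pos hneg]
        have hcnt : pvNegCnt (x :: xs) = pvNegCnt xs + 1 := by
          unfold pvNegCnt; simp [hneg]
        have hK' : K - 1 < 0 ∨ (pvNegCnt xs : Int) ≤ K - 1 := by
          rcases hK with hK | hK
          · left; omega
          · right; rw [hcnt] at hK; push_cast at hK ⊢; omega
        rw [ih (K - 1) hxs hK']
        simp [pvFlip, hneg, hcnt]
        push_cast
        ring
      · rw [if_neg hneg]
        have hx0 : x = 0 := by omega
        have hcnt : pvNegCnt (x :: xs) = pvNegCnt xs := by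
          unfold pvNegCnt; simp [hneg]
        rw [ih K hxs (by rw [hcnt] at hK; exact hK)]
        subst hx0
        simp [pvFlip, hcnt]

theorem sum_map_pvFlip : ∀ (l : List Int),
    (l.map pvFlip).sum = l.sum - 2 * (l.filter (fun x => decide (x < 0))).sum := by
  intro l
  induction l with
  | nil => simp
  | cons x xs ih =>
    by_cases hx : x < 0 <;> simp [pvFlip, hx, List.filter_cons, ih] <;> ring

-- flipping one occurrence of v (at its first index) subtracts 2v from the sum
theorem sum_set_neg_of_index? {l : List Int} {v : Int} {idx : Nat}
    (h : PySem.List.index? l v = some idx) :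
    (l.set idx (-v)).sum = l.sum - 2 * v := by
  rw [PySem.List.index?_eq_some_iff] at h
  obtain ⟨pre, suf, rfl, hlen, -⟩ := h
  subst hlen
  rw [List.set_eq_take_append_cons_drop, if_pos (by simp)]
  have hd : List.drop (pre.length + 1) pre = [] := List.drop_eq_nil_of_le (by omega)
  simp [List.take_append, List.drop_append]
  rw [hd]
  simp
  try ring

-- min? (no key) returns the same value on any permutation
theorem min?_val_eq_of_perm {l l' : List Int} {v v' : Int}
    (hp : l.Perm l')
    (h : PySem.List.min? l (fun x => x) = some v)
    (h' : PySem.List.min? l' (fun x => x) = some v') : v = v' := by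
  have hv := PySem.List.min?_mem h
  have hv' := PySem.List.min?_mem h'
  have h1 := PySem.List.min?_isMin h v' (hp.mem_iff.mpr hv')
  have h2 := PySem.List.min?_isMin h' v (hp.mem_iff.mp hv)
  simp at h1 h2
  omega

-- in a ≤-sorted list the negatives are exactly the first pvNegCnt elements
theorem filter_neg_eq_take_of_sorted : ∀ (S : List Int), S.Pairwise (· ≤ ·) →
    S.filter (fun x => decide (x < 0)) = S.take (pvNegCnt S) := by
  intro S
  induction S with
  | nil => simp
  | cons x xs ih =>
    intro hs
    have hxs := (List.pairwise_cons.mp hs).2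
    by_cases hx : x < 0
    · have hcnt : pvNegCnt (x :: xs) = pvNegCnt xs + 1 := by
        unfold pvNegCnt; simp [hx]
      rw [hcnt]
      simp [List.filter_cons, hx, ih hxs]
    · have h0 : pvNegCnt (x :: xs) = 0 := pvNegCnt_zero_of_head_nonneg hs (by omega)
      have hall : xs.filter (fun x => decide (x < 0)) = [] := by
        rw [List.filter_eq_nil_iff]
        intro a ha
        have := (List.pairwise_cons.mp hs).1 a ha
        simp; omega
      rw [h0]
      simp [List.filter_cons, hx, hall]

-- sorted(filter) = filter(sorted)
theorem sorted_filter_comm (A : List Int) (p : Int → Bool) :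
    PySem.List.sorted (A.filter p) (fun x => x) false
      = (PySem.List.sorted A (fun x => x) false).filter p := by
  apply PySem.List.sorted_id_eq_of_perm_of_pairwise
  · exact (PySem.List.sorted_perm A (fun x => x) false).filter p
  · exact List.Pairwise.filter p (by simpa using PySem.List.sorted_pairwise A (fun x => x))

theorem pvFlip_eq_abs : pvFlip = fun x : Int => |x| := by
  funext x
  simp only [pvFlip]
  split_ifs with h
  · exact (abs_of_neg h).symm
  · exact (abs_of_nonneg (by omega)).symm

theorem maximize_sum_array_eq_alt (A : List Int) (K : Int)
    (hpre : Pre_maximize_sum_array A K) :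
    maximize_sum_array A K = maximize_sum_array_alt A K := by
  unfold maximize_sum_array maximize_sum_array_alt
  dsimp only
  set S := PySem.List.sorted A (fun x => x) false with hS
  have hperm : S.Perm A := PySem.List.sorted_perm A (fun x => x) false
  have hpair : S.Pairwise (· ≤ ·) := by simpa using PySem.List.sorted_pairwise A (fun x => x)
  have hsum : S.sum = A.sum := hperm.sum_eq
  have hfilt : (S.filter (fun x => decide (x < 0))).Perm (A.filter (fun x => decide (x < 0))) :=
    hperm.filter _
  set m : Int := ((A.filter (fun x => decide (x < 0))).length : Int) with hm
  have hmS : ((pvNegCnt S : Nat) : Int) = m := by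
    rw [hm]
    unfold pvNegCnt
    rw [List.countP_eq_length_filter]
    exact congrArg (fun n : Nat => (n : Int)) hfilt.length_eq
  rw [pvALoop_eq_go S.length S K 0 (by omega)]
  simp only [List.take_zero, List.drop_zero, List.nil_append]
  by_cases hcase : 0 ≤ K ∧ K < m
  · rw [if_pos hcase]
    rw [pvGo_flip_some S K hpair hcase.1 (by rw [hmS]; exact hcase.2)]
    have hmod0 : ¬ PySem.Int.mod (0 : Int) 2 ≠ 0 := by decide
    rw [if_neg hmod0]
    rw [sorted_filter_comm, filter_neg_eq_take_of_sorted S hpair]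
    rw [PySem.List.slice_to _ hcase.1, List.take_take]
    have hmin : min K.toNat (pvNegCnt S) = K.toNat := by
      have h2 := hcase.2
      rw [← hmS] at h2
      omega
    rw [hmin]
    dsimp only
    rw [List.sum_append]
    have hneg2 : (List.map (fun x : Int => -x) (S.take K.toNat)).sum = -(S.take K.toNat).sum :=
      Eq.symm (List.sum_neg _)
    have hsplit : (S.take K.toNat).sum + (S.drop K.toNat).sum = S.sum := by
      rw [← List.sum_append, List.take_append_drop]
    omega
  · rw [if_neg hcase]
    have hKcond : K < 0 ∨ ((pvNegCnt S : Nat) : Int) ≤ K := by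
      by_cases h : 0 ≤ K
      · right; rw [hmS]; omega
      · left; omega
    rw [pvGo_flip_all S K hpair hKcond]
    rw [hmS]
    have hnegsum : (S.filter (fun x => decide (x < 0))).sum
        = (A.filter (fun x => decide (x < 0))).sum := hfilt.sum_eq
    by_cases hmod : PySem.Int.mod (K - m) 2 ≠ 0
    · rw [if_pos hmod, if_pos hmod]
      dsimp only
      have hAne : A ≠ [] := by
        intro hA
        apply hmod
        subst hA
        simp at hm
        rw [hm] at *
        simpa using hpre rfl
      have hSne : S ≠ [] := by
        intro h
        rw [h] at hperm
        exact hAne hperm.nil_eq.symm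
      have hMeq : S.map pvFlip = S.map (fun x => |x|) := by rw [pvFlip_eq_abs]
      have hMperm : (S.map pvFlip).Perm (A.map (fun x => |x|)) := by
        rw [hMeq]; exact hperm.map _
      have hMne : S.map pvFlip ≠ [] := by simpa using hSne
      have hBne : A.map (fun x => |x|) ≠ [] := by simpa using hAne
      cases hmv : PySem.List.min? (S.map pvFlip) (fun x => x) with
      | none => exact absurd ((PySem.List.min?_eq_none_iff _ _).mp hmv) hMne
      | some v =>
        cases hmv' : PySem.List.min? (A.map (fun x => |x|)) (fun x => x) with
        | none => exact absurd ((PySem.List.min?_eq_none_iff _ _).mp hmv') hBne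
        | some v' =>
          dsimp only
          have hveq : v = v' := min?_val_eq_of_perm hMperm hmv hmv'
          have hvmem : v ∈ S.map pvFlip := PySem.List.min?_mem hmv
          cases hidx : PySem.List.index? (S.map pvFlip) v with
          | none => exact absurd ((PySem.List.index?_eq_none_iff _ _).mp hidx) (by simpa using hvmem)
          | some idx =>
            dsimp only
            rw [sum_set_neg_of_index? hidx]
            rw [sum_map_pvFlip, hsum, hnegsum, hveq]
    · rw [if_neg hmod, if_neg hmod]
      dsimp only
      rw [sum_map_pvFlip, hsum, hnegsum]

-- ===== VERDICT (by name: the statement is the Claim_ definition above) =====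
theorem maximize_sum_array_spec : Claim_equal_maximize_sum_array := by
  intro A K _ hpre
  unfold Spec_maximize_sum_array
  exact maximize_sum_array_eq_alt A K hpre
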